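-- pv_equiv track=rewrite | github.com/moonbit-community/moonpython | Lib/re.py | _subn_trim_after_open_bracket
-- ===== SOURCE A (Python) =====
-- def _subn_trim_after_open_bracket(string, count=0):
--     out = []
--     n = 0
--     i = 0
--     while i < len(string):
--         c = string[i]
--         if (c == "[" or c == "(") and i + 1 < len(string) and string[i + 1] == " " and (count == 0 or n < count):
--             out.append(c)
--             n += 1
--             i += 2
--             continue
--         out.append(c)
--         i += 1
--     return "".join(out), n
-- ===== SOURCE B (Python) =====
-- def _subn_trim_after_open_bracket(string, count=0):
--     parts = []
--     pos = 0
--     n = 0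
--     while True:
--         a = string.find("[ ", pos)
--         b = string.find("( ", pos)
--         if a == -1:
--             m = b
--         elif b == -1:
--             m = a
--         else:
--             m = min(a, b)
--         if m == -1 or not (count == 0 or n < count):
--             parts.append(string[pos:])
--             break
--         parts.append(string[pos:m + 1])
--         pos = m + 2
--         n += 1
--     return "".join(parts), n
-- ===== Notes on version B (the rewrite author's own statement) =====
-- stated objective: faster
-- what changed: Replaces A's char-by-char index loop (one append and budget test per character) by a cursor loop that uses str.find for the two bracket-space patterns, merges the two match positions, and copies whole slices between matches, so the per-character work moves into C-level find/slice.
import Mathlib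
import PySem

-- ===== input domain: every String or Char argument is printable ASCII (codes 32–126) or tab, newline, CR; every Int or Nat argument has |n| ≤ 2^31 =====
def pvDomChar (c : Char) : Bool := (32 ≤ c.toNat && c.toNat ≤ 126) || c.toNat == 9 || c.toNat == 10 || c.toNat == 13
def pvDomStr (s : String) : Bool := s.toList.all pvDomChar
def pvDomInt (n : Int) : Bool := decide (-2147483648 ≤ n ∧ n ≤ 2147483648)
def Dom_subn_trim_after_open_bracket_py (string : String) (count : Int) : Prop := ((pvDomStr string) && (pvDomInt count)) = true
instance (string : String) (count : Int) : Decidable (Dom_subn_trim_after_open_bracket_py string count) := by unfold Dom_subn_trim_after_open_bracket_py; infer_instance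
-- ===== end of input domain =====

-- B replaces A's char-by-char index loop by a find-based cursor loop that copies whole
-- chunks between matches of "[ " / "( " (objective: faster by constant factor, measured: C-level find/slice instead of per-character Python bytecode).

-- ===== PORT A =====
-- A's while loop over index i, transcribed as recursion on the remaining characters
-- (the i+1 lookahead becomes a two-cons pattern).
def loopA_subn : List Char → Int → Int → List Char × Int
  | [], _, n => ([], n)
  | [c], _, n => ([c], n)
  | c :: c2 :: rest, count, n =>
    if (c = '[' ∨ c = '(') ∧ c2 = ' ' ∧ (count = 0 ∨ n < count) then
      let r := loopA_subn rest count (n + 1)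
      (c :: r.1, r.2)
    else
      let r := loopA_subn (c2 :: rest) count n
      (c :: r.1, r.2)

def subn_trim_after_open_bracket_py (string : String) (count : Int) : String × Int :=
  let r := loopA_subn string.toList count 0
  (String.mk r.1, r.2)

-- ===== PORT B =====
-- string.find(pat, pos) for the two-char patterns "[ " / "( ", on the suffix from the cursor
def findPair_subn (pat : Char) : List Char → Option Nat
  | c :: c2 :: rest =>
    if c = pat ∧ c2 = ' ' then some 0 else (findPair_subn pat (c2 :: rest)).map (· + 1)
  | _ => none

-- merging the two find results (-1 = none handling in Source B)
def mergeFind_subn : Option Nat → Option Nat → Option Nat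
  | none, b => b
  | some a, none => some a
  | some a, some b => some (min a b)

def mf_subn (s : List Char) : Option Nat :=
  mergeFind_subn (findPair_subn '[' s) (findPair_subn '(' s)

lemma mf_subn_some_pos {s : List Char} {m : Nat} (h : mf_subn s = some m) : 0 < s.length := by
  cases s with
  | nil => simp [mf_subn, findPair_subn, mergeFind_subn] at h
  | cons _ _ => simp

-- Source B's while loop: cursor = the remaining suffix, chunks appended between matches
def loopB_subn (s : List Char) (count n : Int) : List Char × Int :=
  match h : mf_subn s with
  | some m =>
    if count = 0 ∨ n < count then
      let r := loopB_subn (s.drop (m + 2)) count (n + 1)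
      (s.take (m + 1) ++ r.1, r.2)
    else (s, n)
  | none => (s, n)
termination_by s.length
decreasing_by
  have := mf_subn_some_pos h
  simp [List.length_drop]; omega

def subn_trim_after_open_bracket_py_alt (string : String) (count : Int) : String × Int :=
  let r := loopB_subn string.toList count 0
  (String.mk r.1, r.2)

-- ===== PRECONDITION & SPEC =====
def Spec_subn_trim_after_open_bracket_py (string : String) (count : Int) (out : String × Int) : Prop := out = subn_trim_after_open_bracket_py_alt string count
instance (string : String) (count : Int) (out : String × Int) : Decidable (Spec_subn_trim_after_open_bracket_py string count out) := by unfold Spec_subn_trim_after_open_bracket_py; infer_instance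

-- ===== CLAIM (what is proved, stated in full; the proofs are below) =====
def Claim_equal_subn_trim_after_open_bracket_py : Prop := ∀ (string : String) (count : Int), Dom_subn_trim_after_open_bracket_py string count → Spec_subn_trim_after_open_bracket_py string count (subn_trim_after_open_bracket_py string count)

-- ===== LEMMAS AND PROOFS =====

lemma mf_subn_cons2 (c c2 : Char) (rest : List Char) :
    mf_subn (c :: c2 :: rest) =
      if (c = '[' ∨ c = '(') ∧ c2 = ' ' then some 0
      else (mf_subn (c2 :: rest)).map (· + 1) := by
  simp only [mf_subn]
  rw [findPair_subn, findPair_subn]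
  by_cases h1 : c = '[' ∧ c2 = ' '
  · rw [if_pos h1, if_neg (by rintro ⟨rfl, _⟩; exact absurd h1.1 (by decide))]
    rw [if_pos ⟨Or.inl h1.1, h1.2⟩]
    cases findPair_subn '(' (c2 :: rest) <;> simp [mergeFind_subn]
  · by_cases h2 : c = '(' ∧ c2 = ' '
    · rw [if_neg h1, if_pos h2, if_pos ⟨Or.inr h2.1, h2.2⟩]
      cases findPair_subn '[' (c2 :: rest) <;> simp [mergeFind_subn]
    · rw [if_neg h1, if_neg h2, if_neg (by tauto)]
      cases findPair_subn '[' (c2 :: rest) <;> cases findPair_subn '(' (c2 :: rest) <;>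
        simp [mergeFind_subn]

lemma loopB_subn_none {s : List Char} (h : mf_subn s = none) (count n : Int) :
    loopB_subn s count n = (s, n) := by
  rw [loopB_subn]; split <;> simp_all

lemma loopB_subn_some {s : List Char} {m : Nat} (h : mf_subn s = some m) (count n : Int)
    (hb : count = 0 ∨ n < count) :
    loopB_subn s count n =
      (s.take (m + 1) ++ (loopB_subn (s.drop (m + 2)) count (n + 1)).1,
       (loopB_subn (s.drop (m + 2)) count (n + 1)).2) := by
  rw [loopB_subn]; split <;> simp_all

lemma loopB_subn_nb {s : List Char} {count n : Int} (hb : ¬(count = 0 ∨ n < count)) :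
    loopB_subn s count n = (s, n) := by
  rw [loopB_subn]; split <;> simp_all

lemma loopA_subn_nb : ∀ (s : List Char) {count n : Int}, ¬(count = 0 ∨ n < count) →
    loopA_subn s count n = (s, n)
  | [], _, _, _ => rfl
  | [c], _, _, _ => rfl
  | c :: c2 :: rest, count, n, hb => by
    rw [loopA_subn]
    rw [if_neg (by tauto)]
    simp [loopA_subn_nb (c2 :: rest) hb]

lemma loopAB_subn : ∀ (k : Nat) (s : List Char), s.length ≤ k → ∀ (count n : Int),
    loopA_subn s count n = loopB_subn s count n := by
  intro k
  induction k with
  | zero =>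
    intro s hs count n
    have : s = [] := by cases s <;> simp_all
    subst this
    rw [loopB_subn_none (by rfl)]; rfl
  | succ k ih =>
    intro s hs count n
    by_cases hb : count = 0 ∨ n < count
    · cases s with
      | nil => rw [loopB_subn_none (by rfl)]; rfl
      | cons c t =>
        cases t with
        | nil => rw [loopB_subn_none (by rfl)]; rfl
        | cons c2 rest =>
          by_cases hm : (c = '[' ∨ c = '(') ∧ c2 = ' '
          · have hmf : mf_subn (c :: c2 :: rest) = some 0 := by
              rw [mf_subn_cons2, if_pos hm]
            rw [loopB_subn_some hmf count n hb]
            rw [loopA_subn, if_pos ⟨hm.1, hm.2, hb⟩]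
            simp only [List.take, List.drop]
            rw [ih rest (by simp at hs; omega) count (n + 1)]
            simp
          · have hmf : mf_subn (c :: c2 :: rest) = (mf_subn (c2 :: rest)).map (· + 1) := by
              rw [mf_subn_cons2, if_neg hm]
            rw [loopA_subn, if_neg (by tauto)]
            cases hmm : mf_subn (c2 :: rest) with
            | none =>
              rw [hmm] at hmf
              rw [loopB_subn_none hmf]
              rw [ih (c2 :: rest) (by simp at hs ⊢; omega) count n,
                  loopB_subn_none hmm]
            | some m =>
              rw [hmm] at hmf
              rw [loopB_subn_some (m := m + 1) (by simpa using hmf) count n hb]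
              rw [ih (c2 :: rest) (by simp at hs ⊢; omega) count n,
                  loopB_subn_some hmm count n hb]
              simp [List.take, List.drop]
    · rw [loopA_subn_nb s hb, loopB_subn_nb hb]

-- ===== VERDICT (by name: the statement is the Claim_ definition above) =====
theorem subn_trim_after_open_bracket_py_spec : Claim_equal_subn_trim_after_open_bracket_py := by
  intro string count _
  unfold Spec_subn_trim_after_open_bracket_py subn_trim_after_open_bracket_py
    subn_trim_after_open_bracket_py_alt
  rw [loopAB_subn string.toList.length string.toList le_rfl]
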